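-- pv_equiv track=rewrite | github.com/eryem-reyem/2020 | day_10.py | solve_puzzel_1
-- ===== SOURCE A (Python) =====
-- def solve_puzzel_1(puzzel):
--     one = two = three = 0
--
--     for i in range(len(puzzel)):
--         if i+1 < len(puzzel) :
--             number = puzzel[i+1] - puzzel[i]
--         else:
--             break
--
--         if number == 1:
--             one += 1
--         elif number == 2:
--             two += 1
--         elif number == 3:
--             three += 1
--
--     return ((one) * (three))
-- ===== SOURCE B (Python) =====
-- def solve_puzzel_1(puzzel):
--     def gaps(lo, hi):
--         # (ones, threes) counted over adjacent pairs (i, i+1) with lo <= i < hi - 1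
--         if hi - lo < 2:
--             return (0, 0)
--         if hi - lo == 2:
--             d = puzzel[lo + 1] - puzzel[lo]
--             return (int(d == 1), int(d == 3))
--         mid = (lo + hi) // 2
--         o1, t1 = gaps(lo, mid + 1)
--         o2, t2 = gaps(mid, hi)
--         return (o1 + o2, t1 + t2)
--
--     ones, threes = gaps(0, len(puzzel))
--     return ones * threes
-- ===== Notes on version B (the rewrite author's own statement) =====
-- stated objective: alternative
-- what changed: Replaces A's left-to-right indexed loop (break, if/elif chain, three running counters) by a divide-and-conquer recursion that splits the index range in half, counts the 1-gaps and 3-gaps of each half including the boundary pair, and combines the pair counts.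
import Mathlib
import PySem

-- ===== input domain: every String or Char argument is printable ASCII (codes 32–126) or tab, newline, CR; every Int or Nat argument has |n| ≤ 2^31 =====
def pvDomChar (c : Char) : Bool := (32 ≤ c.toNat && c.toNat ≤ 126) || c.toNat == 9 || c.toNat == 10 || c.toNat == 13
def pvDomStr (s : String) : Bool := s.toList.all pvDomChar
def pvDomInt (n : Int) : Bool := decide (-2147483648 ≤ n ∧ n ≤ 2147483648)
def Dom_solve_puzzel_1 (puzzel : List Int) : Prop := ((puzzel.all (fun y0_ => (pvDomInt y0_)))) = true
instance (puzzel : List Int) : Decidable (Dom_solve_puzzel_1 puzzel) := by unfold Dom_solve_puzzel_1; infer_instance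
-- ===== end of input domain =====

-- B replaces A's indexed loop/break/if-elif counters by a divide-and-conquer recursion
-- on the index range, combining (ones, threes) counts of the halves; alternative algorithm, same cost.

-- ===== PORT A =====
-- A's for-i loop with break: counters one/two/three, if/elif chain, returns one*three.
def solve_puzzel_1_loop (puzzel : List Int) (i : Nat) (one two three : Int) : Int :=
  if i < puzzel.length then
    if i + 1 < puzzel.length then
      let number := puzzel.getD (i+1) 0 - puzzel.getD i 0   -- indices provably in range here
      if number = 1 then solve_puzzel_1_loop puzzel (i+1) (one+1) two three
      else if number = 2 then solve_puzzel_1_loop puzzel (i+1) one (two+1) three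
      else if number = 3 then solve_puzzel_1_loop puzzel (i+1) one two (three+1)
      else solve_puzzel_1_loop puzzel (i+1) one two three
    else one * three   -- break
  else one * three
termination_by puzzel.length - i

def solve_puzzel_1 (puzzel : List Int) : Int :=
  solve_puzzel_1_loop puzzel 0 0 0 0

-- ===== PORT B =====
-- Source B's helper gaps(lo, hi): divide-and-conquer on the index range; counts combined.
def solve_puzzel_1_gaps (p : List Int) (lo hi : Nat) : Int × Int :=
  if hi - lo < 2 then (0, 0)
  else if hi - lo = 2 then
    let d := p.getD (lo + 1) 0 - p.getD lo 0   -- indices in range at every call site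
    ((if d = 1 then 1 else 0), (if d = 3 then 1 else 0))
  else
    let mid := (lo + hi) / 2
    let (o1, t1) := solve_puzzel_1_gaps p lo (mid + 1)
    let (o2, t2) := solve_puzzel_1_gaps p mid hi
    (o1 + o2, t1 + t2)
termination_by hi - lo
decreasing_by all_goals omega

def solve_puzzel_1_alt (puzzel : List Int) : Int :=
  let (ones, threes) := solve_puzzel_1_gaps puzzel 0 puzzel.length
  ones * threes

-- ===== PRECONDITION & SPEC =====
def Spec_solve_puzzel_1 (puzzel : List Int) (out : Int) : Prop := out = solve_puzzel_1_alt puzzel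
instance (puzzel : List Int) (out : Int) : Decidable (Spec_solve_puzzel_1 puzzel out) := by unfold Spec_solve_puzzel_1; infer_instance

-- ===== CLAIM =====
def Claim_equal_solve_puzzel_1 : Prop := ∀ (puzzel : List Int), Dom_solve_puzzel_1 puzzel → Spec_solve_puzzel_1 puzzel (solve_puzzel_1 puzzel)

-- ===== LEMMAS AND PROOFS =====

-- the diff list still to be processed when A's loop index is i
def pvDiffsFrom (p : List Int) (i : Nat) : List Int :=
  List.zipWith (fun a b => b - a) (p.drop i) (p.drop (i+1))

lemma pvDiffsFrom_nil (p : List Int) (i : Nat) (h : ¬ i + 1 < p.length) :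
    pvDiffsFrom p i = [] := by
  unfold pvDiffsFrom
  have : p.drop (i+1) = [] := List.drop_eq_nil_of_le (by omega)
  simp [this]

lemma pvDiffsFrom_cons (p : List Int) (i : Nat) (h : i + 1 < p.length) :
    pvDiffsFrom p i = (p.getD (i+1) 0 - p.getD i 0) :: pvDiffsFrom p (i+1) := by
  unfold pvDiffsFrom
  have h0 : i < p.length := by omega
  have h1 : p.drop i = p[i] :: p.drop (i+1) := List.drop_eq_getElem_cons h0
  have h2 : p.drop (i+1) = p[i+1] :: p.drop (i+2) := List.drop_eq_getElem_cons h
  have ga : p.getD (i+1) 0 = p[i+1] := List.getD_eq_getElem p 0 h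
  have gb : p.getD i 0 = p[i] := List.getD_eq_getElem p 0 h0
  rw [h1, h2, show i+1+1 = i+2 from rfl, ga, gb]
  simp only [List.zipWith_cons_cons]

lemma solve_puzzel_1_loop_eq (p : List Int) (i : Nat) (one two three : Int) :
    solve_puzzel_1_loop p i one two three =
      (one + ((pvDiffsFrom p i).count 1 : Int)) * (three + ((pvDiffsFrom p i).count 3 : Int)) := by
  fun_induction solve_puzzel_1_loop p i one two three with
  | case1 i one two three hlt hlt1 number heq ih =>
      have hd : p.getD (i+1) 0 - p.getD i 0 = 1 := heq
      rw [ih, pvDiffsFrom_cons p i hlt1, hd]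
      simp only [List.count_cons, beq_iff_eq, if_true]
      push_cast
      ring
  | case2 i one two three hlt hlt1 number hne heq ih =>
      have hd : p.getD (i+1) 0 - p.getD i 0 = 2 := heq
      rw [ih, pvDiffsFrom_cons p i hlt1, hd]
      simp only [List.count_cons, beq_iff_eq]
      push_cast
      ring
  | case3 i one two three hlt hlt1 number hne hne2 heq ih =>
      have hd : p.getD (i+1) 0 - p.getD i 0 = 3 := heq
      rw [ih, pvDiffsFrom_cons p i hlt1, hd]
      simp only [List.count_cons, beq_iff_eq, if_true]
      push_cast
      ring
  | case4 i one two three hlt hlt1 number hne hne2 hne3 ih =>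
      have h1 : ¬ (p.getD (i+1) 0 - p.getD i 0 = 1) := hne
      have h3 : ¬ (p.getD (i+1) 0 - p.getD i 0 = 3) := hne3
      rw [ih, pvDiffsFrom_cons p i hlt1]
      simp only [List.count_cons, beq_iff_eq]
      rw [if_neg h1, if_neg h3]
      push_cast
      ring
  | case5 i one two three hlt hlt1 =>
      rw [pvDiffsFrom_nil p i hlt1]
      simp
  | case6 i one two three hlt =>
      rw [pvDiffsFrom_nil p i (by omega)]
      simp

-- the diff list of the index segment [lo, hi-1)
def pvDiffsSeg (p : List Int) (lo hi : Nat) : List Int :=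
  (List.range' lo (hi - 1 - lo)).map (fun i => p.getD (i+1) 0 - p.getD i 0)

lemma pvDiffsSeg_split (p : List Int) (lo mid hi : Nat)
    (h1 : lo ≤ mid) (h2 : mid + 1 ≤ hi) :
    pvDiffsSeg p lo hi = pvDiffsSeg p lo (mid + 1) ++ pvDiffsSeg p mid hi := by
  unfold pvDiffsSeg
  rw [← List.map_append]
  have : List.range' lo (mid - lo) ++ List.range' mid (hi - 1 - mid) =
      List.range' lo (hi - 1 - lo) := by
    have := List.range'_append (s:=lo) (m:=mid - lo) (n:=hi - 1 - mid) (step:=1)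
    simp only [one_mul] at this
    rw [show lo + (mid - lo) = mid by omega] at this
    rw [show mid - lo + (hi - 1 - mid) = hi - 1 - lo by omega] at this
    exact this
  rw [show mid + 1 - 1 - lo = mid - lo by omega, this]

lemma solve_puzzel_1_gaps_eq (p : List Int) (lo hi : Nat) :
    solve_puzzel_1_gaps p lo hi =
      (((pvDiffsSeg p lo hi).count 1 : Int), ((pvDiffsSeg p lo hi).count 3 : Int)) := by
  fun_induction solve_puzzel_1_gaps p lo hi with
  | case1 lo hi h =>
      have : hi - 1 - lo = 0 := by omega
      simp [pvDiffsSeg, this]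
  | case2 lo hi h h2 d =>
      have : hi - 1 - lo = 1 := by omega
      simp only [pvDiffsSeg, this, List.range'_one, List.map_cons, List.map_nil]
      by_cases hd1 : d = 1 <;> by_cases hd3 : d = 3 <;>
        simp_all [d]
  | case3 lo hi h h2 mid o1 t1 ht1 o2 t2 ht2 ih1 ih2 =>
      rw [pvDiffsSeg_split p lo mid hi (by omega) (by omega)]
      have e1 : (o1, t1) = (((pvDiffsSeg p lo (mid+1)).count 1 : Int), ((pvDiffsSeg p lo (mid+1)).count 3 : Int)) := by
        rw [← ht1, ih1]
      have e2 : (o2, t2) = (((pvDiffsSeg p mid hi).count 1 : Int), ((pvDiffsSeg p mid hi).count 3 : Int)) := by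
        rw [← ht2, ih2]
      obtain ⟨g1, g2⟩ := Prod.mk.injEq .. ▸ e1
      obtain ⟨g3, g4⟩ := Prod.mk.injEq .. ▸ e2
      simp only [List.count_append, g1, g2, g3, g4]
      push_cast
      rfl

-- A's remaining diff list equals the index-segment diff list
lemma pvDiffsFrom_eq_seg (p : List Int) : ∀ (n i : Nat), p.length - i ≤ n →
    pvDiffsFrom p i = pvDiffsSeg p i p.length := by
  intro n
  induction n with
  | zero =>
      intro i h
      rw [pvDiffsFrom_nil p i (by omega)]
      unfold pvDiffsSeg
      rw [show p.length - 1 - i = 0 by omega]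
      simp
  | succ n ih =>
      intro i h
      by_cases hlt : i + 1 < p.length
      · rw [pvDiffsFrom_cons p i hlt, ih (i+1) (by omega)]
        unfold pvDiffsSeg
        rw [show p.length - 1 - i = (p.length - 1 - (i+1)) + 1 by omega,
            List.range'_succ]
        simp
      · rw [pvDiffsFrom_nil p i hlt]
        unfold pvDiffsSeg
        rw [show p.length - 1 - i = 0 by omega]
        simp

-- ===== VERDICT =====
theorem solve_puzzel_1_spec : Claim_equal_solve_puzzel_1 := by
  intro p _
  unfold Spec_solve_puzzel_1 solve_puzzel_1 solve_puzzel_1_alt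
  rw [solve_puzzel_1_loop_eq, solve_puzzel_1_gaps_eq,
      pvDiffsFrom_eq_seg p p.length 0 (by omega)]
  simp
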